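-- pv_equiv track=rewrite | github.com/sharathkumar49/learning | Python programs/LeetCodeSolutions/1101.TheEarliestMomentWhenEveryoneBecomeFriends.py | earliestAcq
-- ===== SOURCE A (Python) =====
-- from typing import List
--
-- def earliestAcq(logs: List[List[int]], N: int) -> int:
--     logs.sort()
--     parent = list(range(N))
--     def find(x):
--         while parent[x] != x:
--             parent[x] = parent[parent[x]]
--             x = parent[x]
--         return x
--     count = N
--     for t, a, b in logs:
--         pa, pb = find(a), find(b)
--         if pa != pb:
--             parent[pa] = pb
--             count -= 1
--             if count == 1:
--                 return t
--     return -1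
-- ===== SOURCE B (Python) =====
-- def earliestAcq(logs, N):
--     logs.sort()
--     gid = list(range(N))          # group id of each node
--     members = {i: [i] for i in range(N)}   # group id -> list of member nodes
--     count = N
--     for t, a, b in logs:
--         ga, gb = gid[a], gid[b]
--         if ga != gb:
--             if len(members[ga]) > len(members[gb]):
--                 ga, gb = gb, ga
--             for x in members[ga]:
--                 gid[x] = gb
--             members[gb].extend(members[ga])
--             del members[ga]
--             count -= 1
--             if count == 1:
--                 return t
--     return -1
-- ===== Notes on version B (the rewrite author's own statement) =====
-- stated objective: alternative
-- what changed: Replaces the parent-pointer union-find forest (find with path-compression chain walks) by explicit component bookkeeping: a group-id array plus a dict mapping each group id to its member list, merging the smaller member list into the larger one.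
-- outside the precondition, e.g. on earliestAcq([[1, 0, 1], [2, 3]], 2): A returns 1, B returns 1
import Mathlib
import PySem

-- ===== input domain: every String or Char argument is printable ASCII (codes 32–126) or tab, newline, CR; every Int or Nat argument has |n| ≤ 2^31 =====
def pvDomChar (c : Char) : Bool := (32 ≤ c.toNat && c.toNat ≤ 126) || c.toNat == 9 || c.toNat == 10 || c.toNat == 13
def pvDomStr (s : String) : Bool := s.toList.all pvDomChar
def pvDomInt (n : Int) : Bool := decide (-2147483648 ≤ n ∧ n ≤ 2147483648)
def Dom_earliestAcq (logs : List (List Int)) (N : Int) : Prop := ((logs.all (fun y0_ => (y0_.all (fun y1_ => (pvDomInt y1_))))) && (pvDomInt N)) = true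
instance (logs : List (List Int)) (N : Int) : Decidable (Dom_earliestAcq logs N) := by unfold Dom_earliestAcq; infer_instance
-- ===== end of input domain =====

-- B replaces A's parent-pointer union-find (find with path compression) by explicit
-- component bookkeeping: a group-id array plus a map from group id to its member list,
-- merging the smaller component into the larger.  Both A and B sort `logs` in place
-- (the equivalence proved here is about the return value; the mutation is identical).

-- ===== PORT A =====
-- find(x): the while loop becomes fuel recursion; the fuel `parent.length + 1` only
-- makes the loop total — under Pre_ the proof shows it is never exhausted.
def pvFind (parent : List Int) (x : Int) : Nat → Int × List Int
  | 0 => (x, parent)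
  | fuel+1 =>
    if PySem.List.pyGetD parent x 0 ≠ x then
      let ppx := PySem.List.pyGetD parent (PySem.List.pyGetD parent x 0) 0
      pvFind (PySem.List.pySetD parent x ppx) ppx fuel
    else (x, parent)

-- the `for t, a, b in logs` loop of A, with early return
def pvLoopA : List (List Int) → List Int → Int → Int
  | [], _, _ => -1
  | l :: rest, parent, count =>
    let t := PySem.List.pyGetD l 0 0
    let a := PySem.List.pyGetD l 1 0
    let b := PySem.List.pyGetD l 2 0
    let fa := pvFind parent a (parent.length + 1)
    let fb := pvFind fa.2 b (fa.2.length + 1)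
    if fa.1 ≠ fb.1 then
      if count - 1 = 1 then t
      else pvLoopA rest (PySem.List.pySetD fb.2 fa.1 fb.1) (count - 1)
    else pvLoopA rest fb.2 count

def earliestAcq (logs : List (List Int)) (N : Int) : Int :=
  pvLoopA (PySem.List.sorted logs (fun l => l) false) (PySem.List.pyRange 0 N 1) N

-- ===== PORT B =====
-- for x in members[ga]: gid[x] = gb
def pvAssign (gid : List Int) (l : List Int) (g : Int) : List Int :=
  l.foldl (fun d x => PySem.List.pySetD d x g) gid

-- the `for t, a, b in logs` loop of B, with early return
def pvLoopB : List (List Int) → List Int → PySem.Dict Int (List Int) → Int → Int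
  | [], _, _, _ => -1
  | l :: rest, gid, members, count =>
    let t := PySem.List.pyGetD l 0 0
    let a := PySem.List.pyGetD l 1 0
    let b := PySem.List.pyGetD l 2 0
    let ga0 := PySem.List.pyGetD gid a 0
    let gb0 := PySem.List.pyGetD gid b 0
    if ga0 ≠ gb0 then
      let swap := (members.getD ga0 []).length > (members.getD gb0 []).length
      let ga := if swap then gb0 else ga0
      let gb := if swap then ga0 else gb0
      let gid' := pvAssign gid (members.getD ga []) gb
      let members' := (members.insert gb ((members.getD gb []) ++ (members.getD ga []))).erase ga
      if count - 1 = 1 then t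
      else pvLoopB rest gid' members' (count - 1)
    else pvLoopB rest gid members count

def earliestAcq_alt (logs : List (List Int)) (N : Int) : Int :=
  pvLoopB (PySem.List.sorted logs (fun l => l) false)
          (PySem.List.pyRange 0 N 1)
          ((PySem.List.pyRange 0 N 1).foldl (fun d i => d.insert i [i]) PySem.Dict.empty)
          N

-- ===== PRECONDITION & SPEC =====
-- Pre_ requires every log row to have exactly three entries (else tuple unpacking
-- raises ValueError) and both endpoints to be in-range list indices for a list of
-- length N, i.e. in [-N, N) (else IndexError).  This is slightly narrower than A's
-- non-raising domain: A (and B, identically) can return early, before ever reaching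
-- a later malformed row; on such inputs both programs return the same value.
def Pre_earliestAcq (logs : List (List Int)) (N : Int) : Prop :=
  ∀ l ∈ logs, l.length = 3 ∧ -N ≤ l.getD 1 0 ∧ l.getD 1 0 < N ∧ -N ≤ l.getD 2 0 ∧ l.getD 2 0 < N
instance (logs : List (List Int)) (N : Int) : Decidable (Pre_earliestAcq logs N) := by
  unfold Pre_earliestAcq; infer_instance

def pvWitness_earliestAcq : List (List Int) × Int := ([[0, 0, 1], [1, 1, 2]], 3)

def Spec_earliestAcq (logs : List (List Int)) (N : Int) (out : Int) : Prop := out = earliestAcq_alt logs N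
instance (logs : List (List Int)) (N : Int) (out : Int) : Decidable (Spec_earliestAcq logs N out) := by unfold Spec_earliestAcq; infer_instance

-- ===== CLAIM (what is proved, stated in full; the proofs are below) =====
def Claim_equal_earliestAcq : Prop := ∀ (logs : List (List Int)) (N : Int), Dom_earliestAcq logs N → Pre_earliestAcq logs N → Spec_earliestAcq logs N (earliestAcq logs N)

-- ===== LEMMAS AND PROOFS =====

-- ---- abstractions over A's parent array ----
def pvPget (p : List Int) (i : Int) : Int := PySem.List.pyGetD p i 0

def pvIter (p : List Int) : Nat → Int → Int
  | 0, x => x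
  | k+1, x => pvIter p k (pvPget p x)

def pvValid (p : List Int) (n : Int) : Prop :=
  (p.length : Int) = n ∧ ∀ i : Int, 0 ≤ i → i < n → 0 ≤ pvPget p i ∧ pvPget p i < n

def pvIsRoot (p : List Int) (x r : Int) : Prop := pvPget p r = r ∧ ∃ k, pvIter p k x = r

def pvTotal (p : List Int) (n : Int) : Prop := ∀ x, 0 ≤ x → x < n → ∃ r, pvIsRoot p x r

def pvSame (p : List Int) (x y : Int) : Prop := ∃ r, pvIsRoot p x r ∧ pvIsRoot p y r

lemma pvFind_succ (p : List Int) (x : Int) (fuel : Nat) :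
    pvFind p x (fuel + 1) =
      if pvPget p x ≠ x then
        pvFind (PySem.List.pySetD p x (pvPget p (pvPget p x))) (pvPget p (pvPget p x)) fuel
      else (x, p) := rfl

-- ---- basic pget/set lemmas ----
lemma pvPget_set (p : List Int) (x v z : Int) (hx0 : 0 ≤ x) (hxl : x < (p.length : Int))
    (hz : 0 ≤ z) :
    pvPget (PySem.List.pySetD p x v) z = if z = x then v else pvPget p z := by
  rw [PySem.List.pySetD_of_nonneg p v hx0]
  simp only [pvPget, PySem.List.pyGetD, PySem.List.pyGet?, PySem.List.pyIdx?, List.length_set]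
  by_cases hzl : z < (p.length : Int)
  · rw [if_pos hz, if_pos hzl]
    simp only [Option.bind_some]
    rw [List.getElem?_set]
    have hxlen : x.toNat < p.length := by omega
    by_cases hzx : z = x
    · subst hzx; simp [hxlen]
    · have hne : x.toNat ≠ z.toNat := by omega
      simp [hne, hzx]
  · rw [if_pos hz, if_neg hzl, if_neg (by omega : ¬ z = x)]
    rfl

lemma pvPget_neg (p : List Int) (x : Int) (h1 : -(p.length : Int) ≤ x) (h2 : x < 0) :
    pvPget p x = pvPget p (x + p.length) := by
  simp only [pvPget, PySem.List.pyGetD, PySem.List.pyGet?, PySem.List.pyIdx?]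
  rw [if_neg (by omega : ¬ (0:Int) ≤ x), if_pos h1,
      if_pos (by omega : (0:Int) ≤ x + p.length),
      if_pos (by omega : x + (p.length : Int) < p.length)]
  have hk : p.length - (-x).toNat = (x + (p.length : Int)).toNat := by omega
  rw [hk]

lemma pvSetD_neg (p : List Int) (x v : Int) (h1 : -(p.length : Int) ≤ x) (h2 : x < 0) :
    PySem.List.pySetD p x v = PySem.List.pySetD p (x + p.length) v := by
  simp only [PySem.List.pySetD, PySem.List.pySet?, PySem.List.pyIdx?]
  rw [if_neg (by omega : ¬ (0:Int) ≤ x), if_pos h1,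
      if_pos (by omega : (0:Int) ≤ x + p.length),
      if_pos (by omega : x + (p.length : Int) < p.length)]
  have hk : p.length - (-x).toNat = (x + (p.length : Int)).toNat := by omega
  rw [hk]

-- ---- iteration lemmas ----
lemma pvIter_add (p : List Int) (a b : Nat) (x : Int) :
    pvIter p (a + b) x = pvIter p a (pvIter p b x) := by
  induction b generalizing x with
  | zero => rfl
  | succ b ih =>
    have h : a + (b + 1) = (a + b) + 1 := by omega
    rw [h]
    show pvIter p (a + b) (pvPget p x) = _
    rw [ih]
    rfl

lemma pvIter_fix (p : List Int) (r : Int) (h : pvPget p r = r) : ∀ k, pvIter p k r = r := by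
  intro k
  induction k with
  | zero => rfl
  | succ k ih => show pvIter p k (pvPget p r) = r; rw [h]; exact ih

lemma pvIter_valid (p : List Int) (n x : Int) (hV : pvValid p n) (h0 : 0 ≤ x) (h1 : x < n) :
    ∀ k, 0 ≤ pvIter p k x ∧ pvIter p k x < n := by
  suffices h : ∀ k (y : Int), 0 ≤ y → y < n → 0 ≤ pvIter p k y ∧ pvIter p k y < n from
    fun k => h k x h0 h1
  intro k
  induction k with
  | zero => intro y hy0 hy1; exact ⟨hy0, hy1⟩
  | succ k ih =>
    intro y hy0 hy1
    have hv := hV.2 y hy0 hy1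
    exact ih _ hv.1 hv.2

lemma pvRoot_unique (p : List Int) (x r1 r2 : Int)
    (h1 : pvIsRoot p x r1) (h2 : pvIsRoot p x r2) : r1 = r2 := by
  obtain ⟨hf1, k1, e1⟩ := h1
  obtain ⟨hf2, k2, e2⟩ := h2
  have key : ∀ (j1 j2 : Nat) (s1 s2 : Int), j1 ≤ j2 → pvPget p s1 = s1 →
      pvIter p j1 x = s1 → pvIter p j2 x = s2 → s2 = s1 := by
    intro j1 j2 s1 s2 hle hf e1 e2
    have h : j2 = (j2 - j1) + j1 := by omega
    rw [h, pvIter_add, e1, pvIter_fix p s1 hf] at e2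
    exact e2.symm
  rcases le_total k1 k2 with h | h
  · exact (key k1 k2 r1 r2 h hf1 e1 e2).symm
  · exact key k2 k1 r2 r1 h hf2 e2 e1

lemma pvRoot_valid (p : List Int) (n x r : Int) (hV : pvValid p n) (h0 : 0 ≤ x) (h1 : x < n)
    (hr : pvIsRoot p x r) : 0 ≤ r ∧ r < n := by
  obtain ⟨_, k, e⟩ := hr
  rw [← e]
  exact pvIter_valid p n x hV h0 h1 k

lemma pv_small_aux (p : List Int) (n x r : Int) (hV : pvValid p n) (h0 : 0 ≤ x) (h1 : x < n)
    (k : Nat) (e : pvIter p k x = r) (hk : ¬ k ≤ p.length)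
    (ih : ∀ m, m < k → pvIter p m x = r → ∃ k' ≤ p.length, pvIter p k' x = r)
    (i j : Nat) (hlt : i < j) (hj : j < p.length + 1)
    (heq : (pvIter p i x).toNat = (pvIter p j x).toNat) :
    ∃ k' ≤ p.length, pvIter p k' x = r := by
  have hvi := pvIter_valid p n x hV h0 h1 i
  have hvj := pvIter_valid p n x hV h0 h1 j
  have hij : pvIter p i x = pvIter p j x := by omega
  have e2 : pvIter p ((k - j) + i) x = r := by
    have h3 : (k - j) + j = k := by omega
    calc pvIter p ((k - j) + i) x = pvIter p (k - j) (pvIter p i x) := pvIter_add p _ i x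
      _ = pvIter p (k - j) (pvIter p j x) := by rw [hij]
      _ = pvIter p ((k - j) + j) x := (pvIter_add p _ j x).symm
      _ = r := by rw [h3]; exact e
  exact ih ((k - j) + i) (by omega) e2

lemma pvSmall_dist (p : List Int) (n x r : Int) (hV : pvValid p n) (h0 : 0 ≤ x) (h1 : x < n)
    (hr : pvIsRoot p x r) : ∃ k ≤ p.length, pvIter p k x = r := by
  obtain ⟨hf, k, e⟩ := hr
  clear hf
  revert e
  induction k using Nat.strong_induction_on with
  | _ k ih =>
    intro e
    by_cases hk : k ≤ p.length
    · exact ⟨k, hk, e⟩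
    · -- pigeonhole among the first p.length + 1 iterates
      have hmap : ∀ i ∈ Finset.range (p.length + 1),
          (fun i => (pvIter p i x).toNat) i ∈ Finset.range p.length := by
        intro i _
        have hv := pvIter_valid p n x hV h0 h1 i
        have hlen : (p.length : Int) = n := hV.1
        simp only [Finset.mem_range]
        omega
      obtain ⟨i, hi, j, hj, hne, heq⟩ :=
        Finset.exists_ne_map_eq_of_card_lt_of_maps_to
          (by simp : (Finset.range p.length).card < (Finset.range (p.length + 1)).card) hmap
      simp only [Finset.mem_range] at hi hj
      rcases lt_or_gt_of_ne hne with hlt | hlt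
      · exact pv_small_aux p n x r hV h0 h1 k e hk ih i j hlt hj heq
      · exact pv_small_aux p n x r hV h0 h1 k e hk ih j i hlt hi heq.symm

-- ---- transfer machinery ----
lemma pvTransfer (p q : List Int) (n : Int) (hT : pvTotal p n)
    (hfwd : ∀ z r, 0 ≤ z → z < n → pvIsRoot p z r → pvIsRoot q z r) :
    (∀ z r, 0 ≤ z → z < n → (pvIsRoot q z r ↔ pvIsRoot p z r)) ∧ pvTotal q n := by
  have hiff : ∀ z r, 0 ≤ z → z < n → (pvIsRoot q z r ↔ pvIsRoot p z r) := by
    intro z r hz0 hz1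
    constructor
    · intro hq
      obtain ⟨rp, hrp⟩ := hT z hz0 hz1
      have hq2 := hfwd z rp hz0 hz1 hrp
      have heq := pvRoot_unique q z r rp hq hq2
      rw [heq]
      exact hrp
    · exact hfwd z r hz0 hz1
  refine ⟨hiff, fun z hz0 hz1 => ?_⟩
  obtain ⟨r, hr⟩ := hT z hz0 hz1
  exact ⟨r, (hiff z r hz0 hz1).mpr hr⟩

lemma pvSame_congr (p q : List Int) (n : Int)
    (hiff : ∀ z r, 0 ≤ z → z < n → (pvIsRoot q z r ↔ pvIsRoot p z r)) :
    ∀ x y, 0 ≤ x → x < n → 0 ≤ y → y < n → (pvSame q x y ↔ pvSame p x y) := by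
  intro x y hx0 hx1 hy0 hy1
  constructor
  · rintro ⟨r, h1, h2⟩
    exact ⟨r, (hiff x r hx0 hx1).mp h1, (hiff y r hy0 hy1).mp h2⟩
  · rintro ⟨r, h1, h2⟩
    exact ⟨r, (hiff x r hx0 hx1).mpr h1, (hiff y r hy0 hy1).mpr h2⟩

-- ---- compression step ----
lemma pvValid_set (p : List Int) (n x v : Int) (hV : pvValid p n)
    (hx0 : 0 ≤ x) (hx1 : x < n) (hv0 : 0 ≤ v) (hv1 : v < n) :
    pvValid (PySem.List.pySetD p x v) n := by
  have hlen : (p.length : Int) = n := hV.1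
  have hxl : x < (p.length : Int) := by omega
  constructor
  · rw [PySem.List.length_pySetD]; exact hlen
  · intro i hi0 hi1
    rw [pvPget_set p x v i hx0 hxl hi0]
    by_cases hix : i = x
    · rw [if_pos hix]; exact ⟨hv0, hv1⟩
    · rw [if_neg hix]; exact hV.2 i hi0 hi1

lemma pvCompress_iter (p : List Int) (n x : Int) (hV : pvValid p n)
    (hx0 : 0 ≤ x) (hx1 : x < n) (hne : pvPget p x ≠ x) :
    ∀ k z r, 0 ≤ z → z < n → pvIter p k z = r → pvPget p r = r →
      (∃ k' ≤ k, pvIter (PySem.List.pySetD p x (pvPget p (pvPget p x))) k' z = r) ∧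
      pvPget (PySem.List.pySetD p x (pvPget p (pvPget p x))) r = r := by
  have hlen : (p.length : Int) = n := hV.1
  have hxl : x < (p.length : Int) := by omega
  have hpx := hV.2 x hx0 hx1
  have hw := hV.2 _ hpx.1 hpx.2
  intro k
  induction k using Nat.strong_induction_on with
  | _ k ih =>
    intro z r hz0 hz1 hiter hfix
    have hr01 : 0 ≤ r ∧ r < n := by
      rw [← hiter]; exact pvIter_valid p n z hV hz0 hz1 k
    have hrne : r ≠ x := fun h => hne (h ▸ hfix)
    have hfix' : pvPget (PySem.List.pySetD p x (pvPget p (pvPget p x))) r = r := by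
      rw [pvPget_set p x _ r hx0 hxl hr01.1, if_neg hrne]; exact hfix
    refine ⟨?_, hfix'⟩
    rcases k with _ | k0
    · exact ⟨0, Nat.le_refl 0, hiter⟩
    · by_cases hzx : z = x
      · rw [hzx] at hiter
        rcases k0 with _ | k1
        · have hpxr : pvPget p x = r := hiter
          refine ⟨1, by omega, ?_⟩
          show pvPget (PySem.List.pySetD p x (pvPget p (pvPget p x))) z = r
          rw [hzx, pvPget_set p x _ x hx0 hxl hx0, if_pos rfl, hpxr, hfix]
        · have h2 : pvIter p k1 (pvPget p (pvPget p x)) = r := hiter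
          obtain ⟨k', hk', e'⟩ :=
            (ih k1 (by omega) (pvPget p (pvPget p x)) r hw.1 hw.2 h2 hfix).1
          refine ⟨k' + 1, by omega, ?_⟩
          show pvIter (PySem.List.pySetD p x (pvPget p (pvPget p x))) k'
            (pvPget (PySem.List.pySetD p x (pvPget p (pvPget p x))) z) = r
          rw [hzx, pvPget_set p x _ x hx0 hxl hx0, if_pos rfl]
          exact e'
      · have hz' := hV.2 z hz0 hz1
        have h2 : pvIter p k0 (pvPget p z) = r := hiter
        obtain ⟨k', hk', e'⟩ := (ih k0 (by omega) (pvPget p z) r hz'.1 hz'.2 h2 hfix).1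
        refine ⟨k' + 1, by omega, ?_⟩
        show pvIter (PySem.List.pySetD p x (pvPget p (pvPget p x))) k'
          (pvPget (PySem.List.pySetD p x (pvPget p (pvPget p x))) z) = r
        rw [pvPget_set p x _ z hx0 hxl hz0, if_neg hzx]
        exact e'

lemma pvCompress_fwd (p : List Int) (n x : Int) (hV : pvValid p n)
    (hx0 : 0 ≤ x) (hx1 : x < n) (hne : pvPget p x ≠ x) :
    ∀ z r, 0 ≤ z → z < n → pvIsRoot p z r →
      pvIsRoot (PySem.List.pySetD p x (pvPget p (pvPget p x))) z r := by
  rintro z r hz0 hz1 ⟨hfix, k, e⟩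
  obtain ⟨⟨k', _, e'⟩, hfix'⟩ :=
    pvCompress_iter p n x hV hx0 hx1 hne k z r hz0 hz1 e hfix
  exact ⟨hfix', k', e'⟩

-- ---- find correctness ----
lemma pvFind_spec : ∀ (fuel : Nat) (p : List Int) (x r : Int) (k : Nat) (n : Int),
    pvValid p n → pvTotal p n → 0 ≤ x → x < n →
    pvIter p k x = r → pvPget p r = r → k ≤ fuel →
    (pvFind p x fuel).1 = r ∧
    ((pvFind p x fuel).2).length = p.length ∧
    pvValid (pvFind p x fuel).2 n ∧ pvTotal (pvFind p x fuel).2 n ∧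
    (∀ z s, 0 ≤ z → z < n → (pvIsRoot (pvFind p x fuel).2 z s ↔ pvIsRoot p z s)) := by
  intro fuel
  induction fuel with
  | zero =>
    intro p x r k n hV hT hx0 hx1 hiter hfix hk
    have hk0 : k = 0 := by omega
    rw [hk0] at hiter
    have hxr : x = r := hiter
    exact ⟨hxr, rfl, hV, hT, fun z s _ _ => Iff.rfl⟩
  | succ fuel ih =>
    intro p x r k n hV hT hx0 hx1 hiter hfix hk
    by_cases hcond : pvPget p x ≠ x
    · rw [pvFind_succ, if_pos hcond]
      have hk1 : 1 ≤ k := by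
        rcases Nat.eq_zero_or_pos k with h | h
        · exfalso
          rw [h] at hiter
          have hxr : x = r := hiter
          rw [← hxr] at hfix
          exact hcond hfix
        · exact h
      have hpxv := hV.2 x hx0 hx1
      have hwv := hV.2 _ hpxv.1 hpxv.2
      have hdist : ∃ kw ≤ k - 1, pvIter p kw (pvPget p (pvPget p x)) = r := by
        rcases k with _ | k0
        · omega
        · rcases k0 with _ | k1
          · have hpxr : pvPget p x = r := hiter
            exact ⟨0, by omega, by show pvPget p (pvPget p x) = r; rw [hpxr, hfix]⟩
          · exact ⟨k1, by omega, hiter⟩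
      obtain ⟨kw, hkw, ew⟩ := hdist
      obtain ⟨⟨kw', hkw', ew'⟩, hfix'⟩ :=
        pvCompress_iter p n x hV hx0 hx1 hcond kw _ r hwv.1 hwv.2 ew hfix
      have hV' := pvValid_set p n x _ hV hx0 hx1 hwv.1 hwv.2
      have htrans := pvTransfer p (PySem.List.pySetD p x (pvPget p (pvPget p x))) n hT
        (pvCompress_fwd p n x hV hx0 hx1 hcond)
      have ihres := ih (PySem.List.pySetD p x (pvPget p (pvPget p x))) _ r kw' n
        hV' htrans.2 hwv.1 hwv.2 ew' hfix' (by omega)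
      refine ⟨ihres.1, ?_, ihres.2.2.1, ihres.2.2.2.1, ?_⟩
      · rw [ihres.2.1, PySem.List.length_pySetD]
      · intro z s hz0 hz1
        exact (ihres.2.2.2.2 z s hz0 hz1).trans (htrans.1 z s hz0 hz1)
    · rw [pvFind_succ, if_neg hcond]
      rw [not_not] at hcond
      have hxr : r = x := pvRoot_unique p x r x ⟨hfix, k, hiter⟩ ⟨hcond, 0, rfl⟩
      exact ⟨hxr.symm, rfl, hV, hT, fun z s _ _ => Iff.rfl⟩

lemma pvFind_neg (p : List Int) (n x : Int) (f : Nat) (hV : pvValid p n)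
    (h1 : -n ≤ x) (h2 : x < 0) (hf : 1 ≤ f) :
    pvFind p x (f+1) = pvFind p (x + n) (f+1) := by
  have hlen : (p.length : Int) = n := hV.1
  have hb0 : (0:Int) ≤ x + n := by omega
  have hb1 : x + n < n := by omega
  have hpg : pvPget p x = pvPget p (x + n) := by
    have := pvPget_neg p x (by omega) h2
    rw [hlen] at this
    exact this
  have hset : ∀ v, PySem.List.pySetD p x v = PySem.List.pySetD p (x + n) v := by
    intro v
    have := pvSetD_neg p x v (by omega) h2
    rw [hlen] at this
    exact this
  have hgv := hV.2 (x + n) hb0 hb1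
  have hxne : pvPget p x ≠ x := by rw [hpg]; omega
  have hstepL : pvFind p x (f + 1) =
      pvFind (PySem.List.pySetD p x (pvPget p (pvPget p x))) (pvPget p (pvPget p x)) f := by
    rw [pvFind_succ, if_pos hxne]
  by_cases hc : pvPget p (x + n) = x + n
  · -- x+n is already a root: both sides return (x+n, p)
    have hw : pvPget p (pvPget p x) = x + n := by rw [hpg, hc, hc]
    have hRHS : pvFind p (x + n) (f + 1) = (x + n, p) := by
      rw [pvFind_succ, if_neg (not_not_intro hc)]
    have hself : PySem.List.pySetD p (x + n) (x + n) = p := by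
      rw [PySem.List.pySetD_of_nonneg p (x+n) hb0]
      have hidx : (x + n).toNat < p.length := by omega
      have hg : p[(x + n).toNat] = x + n := by
        have := PySem.List.pyGetD_eq_getElem p (d := 0) hb0 (by omega)
        rw [← this]
        exact hc
      calc p.set (x + n).toNat (x + n)
          = p.set (x + n).toNat p[(x + n).toNat] := by rw [hg]
        _ = p := List.set_getElem_self hidx
    rw [hstepL, hw, hset, hself, hRHS]
    -- now: pvFind p (x+n) f = (x+n, p) with f = f0+1
    rcases f with _ | f0
    · omega
    · rw [pvFind_succ, if_neg (not_not_intro hc)]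
  · -- both sides perform the identical first step
    have hstepR : pvFind p (x + n) (f + 1) =
        pvFind (PySem.List.pySetD p (x+n) (pvPget p (pvPget p (x+n)))) (pvPget p (pvPget p (x+n))) f := by
      rw [pvFind_succ, if_pos hc]
    rw [hstepL, hstepR, hpg, hset]

-- ---- union step ----
lemma pvUnion_valid (p : List Int) (n pa pb : Int) (hV : pvValid p n)
    (hpa0 : 0 ≤ pa) (hpa1 : pa < n) (hpb0 : 0 ≤ pb) (hpb1 : pb < n) :
    pvValid (PySem.List.pySetD p pa pb) n :=
  pvValid_set p n pa pb hV hpa0 hpa1 hpb0 hpb1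

lemma pvUnion_root_iff (p : List Int) (n pa pb : Int) (hV : pvValid p n) (hT : pvTotal p n)
    (hpa0 : 0 ≤ pa) (hpa1 : pa < n) (hpb0 : 0 ≤ pb) (_hpb1 : pb < n)
    (hra : pvPget p pa = pa) (hrb : pvPget p pb = pb) (hne : pa ≠ pb) :
    ∀ z r, 0 ≤ z → z < n →
      (pvIsRoot (PySem.List.pySetD p pa pb) z r ↔
        ((pvIsRoot p z r ∧ r ≠ pa) ∨ (pvIsRoot p z pa ∧ r = pb))) := by
  have hlen : (p.length : Int) = n := hV.1
  have hpal : pa < (p.length : Int) := by omega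
  have hnb : pb ≠ pa := fun h => hne h.symm
  have hfixb : pvPget (PySem.List.pySetD p pa pb) pb = pb := by
    rw [pvPget_set p pa pb pb hpa0 hpal hpb0, if_neg hnb]; exact hrb
  -- (b): z reaching pa in p reaches pb in p'
  have hb : ∀ (k : Nat) (z : Int), 0 ≤ z → z < n → pvIter p k z = pa →
      pvIsRoot (PySem.List.pySetD p pa pb) z pb := by
    intro k
    induction k using Nat.strong_induction_on with
    | _ k ih =>
      intro z hz0 hz1 hiter
      by_cases hzpa : z = pa
      · refine ⟨hfixb, 1, ?_⟩
        show pvPget (PySem.List.pySetD p pa pb) z = pb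
        rw [hzpa, pvPget_set p pa pb pa hpa0 hpal hpa0, if_pos rfl]
      · rcases k with _ | k0
        · exact absurd hiter hzpa
        · have hz' := hV.2 z hz0 hz1
          have h2 : pvIter p k0 (pvPget p z) = pa := hiter
          obtain ⟨_, k', e'⟩ := ih k0 (by omega) (pvPget p z) hz'.1 hz'.2 h2
          refine ⟨hfixb, k' + 1, ?_⟩
          show pvIter (PySem.List.pySetD p pa pb) k' (pvPget (PySem.List.pySetD p pa pb) z) = pb
          rw [pvPget_set p pa pb z hpa0 hpal hz0, if_neg hzpa]
          exact e'
  -- (c): z reaching a root r ≠ pa in p reaches r in p'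
  have hc : ∀ (k : Nat) (z r : Int), 0 ≤ z → z < n → pvIter p k z = r →
      pvPget p r = r → r ≠ pa → pvIsRoot (PySem.List.pySetD p pa pb) z r := by
    intro k
    induction k using Nat.strong_induction_on with
    | _ k ih =>
      intro z r hz0 hz1 hiter hfix hrpa
      have hr01 : 0 ≤ r ∧ r < n := by
        rw [← hiter]; exact pvIter_valid p n z hV hz0 hz1 k
      have hfix' : pvPget (PySem.List.pySetD p pa pb) r = r := by
        rw [pvPget_set p pa pb r hpa0 hpal hr01.1, if_neg hrpa]; exact hfix
      rcases k with _ | k0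
      · exact ⟨hfix', 0, hiter⟩
      · by_cases hzpa : z = pa
        · exfalso
          rw [hzpa] at hiter
          rw [pvIter_fix p pa hra (k0+1)] at hiter
          exact hrpa hiter.symm
        · have hz' := hV.2 z hz0 hz1
          have h2 : pvIter p k0 (pvPget p z) = r := hiter
          obtain ⟨_, k', e'⟩ := ih k0 (by omega) (pvPget p z) r hz'.1 hz'.2 h2 hfix hrpa
          refine ⟨hfix', k' + 1, ?_⟩
          show pvIter (PySem.List.pySetD p pa pb) k' (pvPget (PySem.List.pySetD p pa pb) z) = r
          rw [pvPget_set p pa pb z hpa0 hpal hz0, if_neg hzpa]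
          exact e'
  intro z r hz0 hz1
  constructor
  · intro hq
    obtain ⟨rp, hrp⟩ := hT z hz0 hz1
    by_cases hrppa : rp = pa
    · rw [hrppa] at hrp
      obtain ⟨_, k, e⟩ := hrp
      have h2 := hb k z hz0 hz1 e
      have := pvRoot_unique (PySem.List.pySetD p pa pb) z r pb hq h2
      exact Or.inr ⟨⟨hra, k, e⟩, this⟩
    · obtain ⟨hfix, k, e⟩ := hrp
      have h2 := hc k z rp hz0 hz1 e hfix hrppa
      have heq := pvRoot_unique (PySem.List.pySetD p pa pb) z r rp hq h2
      rw [heq]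
      exact Or.inl ⟨⟨hfix, k, e⟩, hrppa⟩
  · rintro (⟨⟨hfix, k, e⟩, hrpa⟩ | ⟨⟨_, k, e⟩, hrpb⟩)
    · exact hc k z r hz0 hz1 e hfix hrpa
    · rw [hrpb]
      exact hb k z hz0 hz1 e

lemma pvUnion_total (p : List Int) (n pa pb : Int) (hV : pvValid p n) (hT : pvTotal p n)
    (hpa0 : 0 ≤ pa) (hpa1 : pa < n) (hpb0 : 0 ≤ pb) (hpb1 : pb < n)
    (hra : pvPget p pa = pa) (hrb : pvPget p pb = pb) (hne : pa ≠ pb) :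
    pvTotal (PySem.List.pySetD p pa pb) n := by
  intro z hz0 hz1
  obtain ⟨r, hr⟩ := hT z hz0 hz1
  by_cases hrpa : r = pa
  · refine ⟨pb, ?_⟩
    rw [pvUnion_root_iff p n pa pb hV hT hpa0 hpa1 hpb0 hpb1 hra hrb hne z pb hz0 hz1]
    exact Or.inr ⟨hrpa ▸ hr, rfl⟩
  · refine ⟨r, ?_⟩
    rw [pvUnion_root_iff p n pa pb hV hT hpa0 hpa1 hpb0 hpb1 hra hrb hne z r hz0 hz1]
    exact Or.inl ⟨hr, hrpa⟩

-- ---- B-side lemmas ----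
lemma pvAssign_length (gid l : List Int) (g : Int) : (pvAssign gid l g).length = gid.length := by
  induction l generalizing gid with
  | nil => rfl
  | cons x l ih =>
    show (pvAssign (PySem.List.pySetD gid x g) l g).length = gid.length
    rw [ih, PySem.List.length_pySetD]

lemma pvAssign_pget (gid l : List Int) (g : Int)
    (hl : ∀ x ∈ l, 0 ≤ x ∧ x < (gid.length : Int)) (z : Int) (hz : 0 ≤ z) :
    pvPget (pvAssign gid l g) z = if z ∈ l then g else pvPget gid z := by
  induction l generalizing gid with
  | nil => simp [pvAssign]
  | cons x l ih =>
    have hx := hl x (List.mem_cons_self)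
    have hl' : ∀ y ∈ l, 0 ≤ y ∧ y < ((PySem.List.pySetD gid x g).length : Int) := by
      intro y hy
      rw [PySem.List.length_pySetD]
      exact hl y (List.mem_cons_of_mem x hy)
    have hstep : pvAssign gid (x :: l) g = pvAssign (PySem.List.pySetD gid x g) l g := rfl
    rw [hstep, ih (PySem.List.pySetD gid x g) hl',
        pvPget_set gid x g z hx.1 hx.2 hz]
    by_cases hzl : z ∈ l
    · rw [if_pos hzl, if_pos (List.mem_cons_of_mem x hzl)]
    · rw [if_neg hzl]
      by_cases hzx : z = x
      · rw [if_pos hzx, if_pos (by rw [hzx]; exact List.mem_cons_self)]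
      · rw [if_neg hzx, if_neg (by simp [List.mem_cons, hzx, hzl])]

lemma pvDict_get?_erase {ν : Type} (d : PySem.Dict Int ν) (k k' : Int) :
    (d.erase k).get? k' = if k' = k then none else d.get? k' := by
  rcases d with ⟨items⟩
  show Option.map (fun x => x.2) (List.find? (fun p => p.1 == k') (items.filter (fun p => !(p.1 == k)))) =
    if k' = k then none else Option.map (fun x => x.2) (List.find? (fun p => p.1 == k') items)
  induction items with
  | nil => simp
  | cons hd tl ih =>
    by_cases h1 : hd.1 = k <;> by_cases h2 : k' = k <;> by_cases h3 : hd.1 = k' <;>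
      simp_all

lemma pvDict_getD_foldl_insert_fn {ν : Type} (l : List Int) (f : Int → ν)
    (d : PySem.Dict Int ν) (g : Int) (dflt : ν) :
    ((l.foldl (fun d i => d.insert i (f i)) d).getD g dflt) =
      if g ∈ l then f g else d.getD g dflt := by
  induction l generalizing d with
  | nil => simp
  | cons i l ih =>
    show ((l.foldl (fun d i => d.insert i (f i)) (d.insert i (f i))).getD g dflt) = _
    rw [ih (d.insert i (f i)), PySem.Dict.getD_insert]
    by_cases hgl : g ∈ l
    · rw [if_pos hgl, if_pos (List.mem_cons_of_mem i hgl)]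
    · rw [if_neg hgl]
      by_cases hgi : g = i
      · rw [if_pos hgi, if_pos (by rw [hgi]; exact List.mem_cons_self), hgi]
      · rw [if_neg hgi, if_neg (by simp [List.mem_cons, hgi, hgl])]

-- ---- merge-step helper lemmas ----
lemma pvPget_def (p : List Int) (i : Int) : PySem.List.pyGetD p i 0 = pvPget p i := rfl

lemma pvMergeClass (ga gb ga' gb' gx gy Rx Ry ra rb : Int)
    (hsw : (ga' = ga ∧ gb' = gb) ∨ (ga' = gb ∧ gb' = ga))
    (_hrab : ra ≠ rb)
    (hxa : Rx = ra ↔ gx = ga) (hxb : Rx = rb ↔ gx = gb)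
    (hya : Ry = ra ↔ gy = ga) (hyb : Ry = rb ↔ gy = gb)
    (hxy : Rx = Ry ↔ gx = gy) :
    ((if Rx = ra then rb else Rx) = (if Ry = ra then rb else Ry)) ↔
      ((if gx = ga' then gb' else gx) = (if gy = ga' then gb' else gy)) := by
  rcases hsw with ⟨h1, h2⟩ | ⟨h1, h2⟩ <;> subst h1 <;> subst h2 <;> split_ifs <;> omega

lemma pvNewGid_char (gid : List Int) (members : PySem.Dict Int (List Int)) (n ga' gb' : Int)
    (hglen : (gid.length : Int) = n)
    (hmem : ∀ g x, 0 ≤ x → x < n → (x ∈ members.getD g [] ↔ pvPget gid x = g))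
    (hmval : ∀ g x, x ∈ members.getD g [] → 0 ≤ x ∧ x < n) :
    ∀ z, 0 ≤ z → z < n → pvPget (pvAssign gid (members.getD ga' []) gb') z =
      if pvPget gid z = ga' then gb' else pvPget gid z := by
  intro z hz0 hz1
  rw [pvAssign_pget gid (members.getD ga' []) gb'
      (fun x hx => by have := hmval ga' x hx; omega) z hz0]
  by_cases hzm : z ∈ members.getD ga' []
  · rw [if_pos hzm, if_pos ((hmem ga' z hz0 hz1).mp hzm)]
  · rw [if_neg hzm, if_neg (fun h => hzm ((hmem ga' z hz0 hz1).mpr h))]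

lemma pvNewMembers_getD (members : PySem.Dict Int (List Int)) (ga' gb' : Int)
    (_hne : ga' ≠ gb') (g : Int) :
    ((members.insert gb' ((members.getD gb' []) ++ (members.getD ga' []))).erase ga').getD g []
      = if g = ga' then [] else if g = gb' then (members.getD gb' []) ++ (members.getD ga' [])
        else members.getD g [] := by
  rw [PySem.Dict.getD_eq_get?_getD, pvDict_get?_erase]
  by_cases h1 : g = ga'
  · rw [if_pos h1, if_pos h1]; rfl
  · rw [if_neg h1, if_neg h1, PySem.Dict.get?_insert]
    by_cases h2 : g = gb'
    · rw [if_pos h2, if_pos h2]; rfl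
    · rw [if_neg h2, if_neg h2, PySem.Dict.getD_eq_get?_getD]

lemma pvNewMembers_mem (gid : List Int) (members : PySem.Dict Int (List Int)) (n ga' gb' : Int)
    (hne : ga' ≠ gb')
    (hmem : ∀ g x, 0 ≤ x → x < n → (x ∈ members.getD g [] ↔ pvPget gid x = g)) :
    ∀ g x, 0 ≤ x → x < n →
      (x ∈ ((members.insert gb' ((members.getD gb' []) ++ (members.getD ga' []))).erase ga').getD g []
        ↔ (if pvPget gid x = ga' then gb' else pvPget gid x) = g) := by
  intro g x hx0 hx1
  rw [pvNewMembers_getD members ga' gb' hne g]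
  by_cases h1 : g = ga'
  · rw [if_pos h1]
    simp only [List.not_mem_nil, false_iff]
    intro h
    by_cases h2 : pvPget gid x = ga'
    · rw [if_pos h2] at h; exact hne ((h.trans h1).symm)
    · rw [if_neg h2] at h; exact h2 (h.trans h1)
  · rw [if_neg h1]
    by_cases h2 : g = gb'
    · rw [if_pos h2, List.mem_append, hmem gb' x hx0 hx1, hmem ga' x hx0 hx1]
      constructor
      · rintro (h | h)
        · rw [if_neg (by rw [h]; exact fun hh => hne hh.symm), h, h2]
        · rw [if_pos h, h2]
      · intro h
        by_cases h3 : pvPget gid x = ga'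
        · exact Or.inr h3
        · rw [if_neg h3] at h; exact Or.inl (h.trans h2)
    · rw [if_neg h2, hmem g x hx0 hx1]
      constructor
      · intro h
        rw [if_neg (fun hh => h1 (h.symm.trans hh))]
        exact h
      · intro h
        by_cases h3 : pvPget gid x = ga'
        · rw [if_pos h3] at h; exact absurd h.symm h2
        · rw [if_neg h3] at h; exact h
  
lemma pvNewMembers_val (members : PySem.Dict Int (List Int)) (n ga' gb' : Int)
    (hne : ga' ≠ gb')
    (hmval : ∀ g x, x ∈ members.getD g [] → 0 ≤ x ∧ x < n) :
    ∀ g x, x ∈ ((members.insert gb' ((members.getD gb' []) ++ (members.getD ga' []))).erase ga').getD g []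
      → 0 ≤ x ∧ x < n := by
  intro g x hx
  rw [pvNewMembers_getD members ga' gb' hne g] at hx
  by_cases h1 : g = ga'
  · rw [if_pos h1] at hx; exact absurd hx (List.not_mem_nil)
  · rw [if_neg h1] at hx
    by_cases h2 : g = gb'
    · rw [if_pos h2, List.mem_append] at hx
      rcases hx with h | h
      · exact hmval gb' x h
      · exact hmval ga' x h
    · rw [if_neg h2] at hx; exact hmval g x hx

-- ---- the main loop equivalence ----
lemma pvLoop_eq : ∀ (logs : List (List Int)) (p gid : List Int)
    (members : PySem.Dict Int (List Int)) (c n : Int),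
    0 < n →
    pvValid p n → pvTotal p n → (gid.length : Int) = n →
    (∀ x y, 0 ≤ x → x < n → 0 ≤ y → y < n → (pvSame p x y ↔ pvPget gid x = pvPget gid y)) →
    (∀ g x, 0 ≤ x → x < n → (x ∈ members.getD g [] ↔ pvPget gid x = g)) →
    (∀ g x, x ∈ members.getD g [] → 0 ≤ x ∧ x < n) →
    (∀ l ∈ logs, l.length = 3 ∧
      -n ≤ PySem.List.pyGetD l 1 0 ∧ PySem.List.pyGetD l 1 0 < n ∧
      -n ≤ PySem.List.pyGetD l 2 0 ∧ PySem.List.pyGetD l 2 0 < n) →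
    pvLoopA logs p c = pvLoopB logs gid members c := by
  intro logs
  induction logs with
  | nil => intros; rfl
  | cons l rest ih =>
    intro p gid members c n hn hV hT hglen hlink hmem hmval hlogs
    obtain ⟨hlen3, hA0, hA1, hB0, hB1⟩ := hlogs l List.mem_cons_self
    have hrest := fun l' h => hlogs l' (List.mem_cons_of_mem l h)
    have hlenp : (p.length : Int) = n := hV.1
    have hplen1 : 1 ≤ p.length := by omega
    -- normalized endpoints
    set a := PySem.List.pyGetD l 1 0 with ha_def
    set b := PySem.List.pyGetD l 2 0 with hb_def
    set aN := if a < 0 then a + n else a with haN_def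
    set bN := if b < 0 then b + n else b with hbN_def
    have haN0 : 0 ≤ aN := by rw [haN_def]; split <;> omega
    have haN1 : aN < n := by rw [haN_def]; split <;> omega
    have hbN0 : 0 ≤ bN := by rw [hbN_def]; split <;> omega
    have hbN1 : bN < n := by rw [hbN_def]; split <;> omega
    have hgidA : pvPget gid a = pvPget gid aN := by
      rw [haN_def]; split
      · have h := pvPget_neg gid a (by omega) (by omega)
        rw [hglen] at h; exact h
      · rfl
    have hgidB : pvPget gid b = pvPget gid bN := by
      rw [hbN_def]; split
      · have h := pvPget_neg gid b (by omega) (by omega)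
        rw [hglen] at h; exact h
      · rfl
    -- find on a
    obtain ⟨ra, hra⟩ := hT aN haN0 haN1
    obtain ⟨k1, hk1, e1⟩ := pvSmall_dist p n aN ra hV haN0 haN1 hra
    have hs1 := pvFind_spec (p.length + 1) p aN ra k1 n hV hT haN0 haN1 e1 hra.1 (by omega)
    have hfind1 : pvFind p a (p.length + 1) = pvFind p aN (p.length + 1) := by
      rw [haN_def]; split
      · exact pvFind_neg p n a p.length hV (by omega) (by omega) hplen1
      · rfl
    -- find on b, in the array left by find a
    obtain ⟨hs1r, hs1len, hV1, hT1, hiff1⟩ := hs1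
    obtain ⟨rb, hrb1⟩ := hT1 bN hbN0 hbN1
    have hrb : pvIsRoot p bN rb := (hiff1 bN rb hbN0 hbN1).mp hrb1
    obtain ⟨k2, hk2, e2⟩ := pvSmall_dist (pvFind p aN (p.length + 1)).2 n bN rb hV1 hbN0 hbN1 hrb1
    have hs2 := pvFind_spec ((pvFind p aN (p.length + 1)).2.length + 1) (pvFind p aN (p.length + 1)).2
      bN rb k2 n hV1 hT1 hbN0 hbN1 e2 hrb1.1 (by omega)
    obtain ⟨hs2r, hs2len, hV2, hT2, hiff2⟩ := hs2
    have hfind2 : pvFind (pvFind p aN (p.length + 1)).2 b ((pvFind p aN (p.length + 1)).2.length + 1)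
        = pvFind (pvFind p aN (p.length + 1)).2 bN ((pvFind p aN (p.length + 1)).2.length + 1) := by
      rw [hbN_def]; split
      · exact pvFind_neg (pvFind p aN (p.length + 1)).2 n b
          ((pvFind p aN (p.length + 1)).2.length) hV1
          (by omega) (by omega) (by rw [hs1len]; exact hplen1)
      · rfl
    -- iff from the doubly-compressed array back to p
    have hiff20 : ∀ z s, 0 ≤ z → z < n →
        (pvIsRoot (pvFind (pvFind p aN (p.length + 1)).2 bN ((pvFind p aN (p.length + 1)).2.length + 1)).2 z s
          ↔ pvIsRoot p z s) :=
      fun z s hz0 hz1 => (hiff2 z s hz0 hz1).trans (hiff1 z s hz0 hz1)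
    have hlink2 : ∀ x y, 0 ≤ x → x < n → 0 ≤ y → y < n →
        (pvSame (pvFind (pvFind p aN (p.length + 1)).2 bN ((pvFind p aN (p.length + 1)).2.length + 1)).2 x y
          ↔ pvPget gid x = pvPget gid y) :=
      fun x y hx0 hx1 hy0 hy1 =>
        (pvSame_congr p _ n hiff20 x y hx0 hx1 hy0 hy1).trans (hlink x y hx0 hx1 hy0 hy1)
    -- equivalence of the branch conditions
    have hroots : (ra = rb) ↔ (pvPget gid a = pvPget gid b) := by
      rw [hgidA, hgidB, ← hlink aN bN haN0 haN1 hbN0 hbN1]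
      constructor
      · intro h; exact ⟨ra, hra, h ▸ hrb⟩
      · rintro ⟨r, h1, h2⟩
        rw [pvRoot_unique p aN ra r hra h1, pvRoot_unique p bN rb r hrb h2]
    -- unfold one step of both loops
    show (let t := PySem.List.pyGetD l 0 0
      let a := PySem.List.pyGetD l 1 0
      let b := PySem.List.pyGetD l 2 0
      let fa := pvFind p a (p.length + 1)
      let fb := pvFind fa.2 b (fa.2.length + 1)
      if fa.1 ≠ fb.1 then
        if c - 1 = 1 then t
        else pvLoopA rest (PySem.List.pySetD fb.2 fa.1 fb.1) (c - 1)
      else pvLoopA rest fb.2 c) = _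
    show _ = (let t := PySem.List.pyGetD l 0 0
      let a := PySem.List.pyGetD l 1 0
      let b := PySem.List.pyGetD l 2 0
      let ga0 := PySem.List.pyGetD gid a 0
      let gb0 := PySem.List.pyGetD gid b 0
      if ga0 ≠ gb0 then
        let swap := (members.getD ga0 []).length > (members.getD gb0 []).length
        let ga := if swap then gb0 else ga0
        let gb := if swap then ga0 else gb0
        let gid' := pvAssign gid (members.getD ga []) gb
        let members' := (members.insert gb ((members.getD gb []) ++ (members.getD ga []))).erase ga
        if c - 1 = 1 then t
        else pvLoopB rest gid' members' (c - 1)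
      else pvLoopB rest gid members c)
    rw [← ha_def, ← hb_def]
    simp only [pvPget_def]
    rw [hfind1, hfind2, hs1r, hs2r]
    by_cases hc : ra = rb
    · rw [if_neg (by simpa using hc)]
      conv_rhs => rw [if_neg (show ¬ pvPget gid a ≠ pvPget gid b from not_not_intro (hroots.mp hc))]
      exact ih _ gid members c n hn hV2 hT2 hglen hlink2 hmem hmval hrest
    · rw [if_pos (by simpa using hc)]
      conv_rhs => rw [if_pos (show pvPget gid a ≠ pvPget gid b from fun h => hc (hroots.mpr h))]
      by_cases hc1 : c - 1 = 1
      · rw [if_pos hc1]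
        conv_rhs => rw [if_pos hc1]
      · rw [if_neg hc1]
        conv_rhs => rw [if_neg hc1]
        -- the merge step
        set q := (pvFind (pvFind p aN (p.length + 1)).2 bN ((pvFind p aN (p.length + 1)).2.length + 1)).2 with hq_def
        rw [hgidA, hgidB]
        have hra01 := pvRoot_valid p n aN ra hV haN0 haN1 hra
        have hrb01 := pvRoot_valid p n bN rb hV hbN0 hbN1 hrb
        have hqa : pvIsRoot q aN ra := (hiff20 aN ra haN0 haN1).mpr hra
        have hqb : pvIsRoot q bN rb := (hiff20 bN rb hbN0 hbN1).mpr hrb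
        have hraq : pvPget q ra = ra := hqa.1
        have hrbq : pvPget q rb = rb := hqb.1
        have hgne : pvPget gid aN ≠ pvPget gid bN := by
          intro h
          exact hc (hroots.mpr (by rw [hgidA, hgidB]; exact h))
        set ga' := if (members.getD (pvPget gid aN) []).length > (members.getD (pvPget gid bN) []).length
          then pvPget gid bN else pvPget gid aN with hga'_def
        set gb' := if (members.getD (pvPget gid aN) []).length > (members.getD (pvPget gid bN) []).length
          then pvPget gid aN else pvPget gid bN with hgb'_def
        have hsw : (ga' = pvPget gid aN ∧ gb' = pvPget gid bN) ∨
            (ga' = pvPget gid bN ∧ gb' = pvPget gid aN) := by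
          rw [hga'_def, hgb'_def]
          split
          · exact Or.inr ⟨rfl, rfl⟩
          · exact Or.inl ⟨rfl, rfl⟩
        have hga'b' : ga' ≠ gb' := by
          rcases hsw with ⟨h1, h2⟩ | ⟨h1, h2⟩
          · rw [h1, h2]; exact hgne
          · rw [h1, h2]; exact fun h => hgne h.symm
        have hG := pvNewGid_char gid members n ga' gb' hglen hmem hmval
        have hbr : ∀ z w Rz Rw, 0 ≤ z → z < n → 0 ≤ w → w < n →
            pvIsRoot q z Rz → pvIsRoot q w Rw →
            (Rz = Rw ↔ pvPget gid z = pvPget gid w) := by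
          intro z w Rz Rw hz0 hz1 hw0 hw1 hRz hRw
          rw [← hlink2 z w hz0 hz1 hw0 hw1]
          constructor
          · intro h; exact ⟨Rz, hRz, h ▸ hRw⟩
          · rintro ⟨r, h1, h2⟩
            rw [pvRoot_unique q z Rz r hRz h1, pvRoot_unique q w Rw r hRw h2]
        have hchar : ∀ z Rz r', 0 ≤ z → z < n → pvIsRoot q z Rz →
            (pvIsRoot (PySem.List.pySetD q ra rb) z r' ↔ r' = if Rz = ra then rb else Rz) := by
          intro z Rz r' hz0 hz1 hRz
          rw [pvUnion_root_iff q n ra rb hV2 hT2 hra01.1 hra01.2 hrb01.1 hrb01.2 hraq hrbq hc z r' hz0 hz1]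
          by_cases h : Rz = ra
          · rw [if_pos h]
            constructor
            · rintro (⟨h1, h2⟩ | ⟨h1, h2⟩)
              · have heq := pvRoot_unique q z r' Rz h1 hRz
                rw [heq, h] at h2
                exact absurd rfl h2
              · exact h2
            · intro h'
              exact Or.inr ⟨h ▸ hRz, h'⟩
          · rw [if_neg h]
            constructor
            · rintro (⟨h1, h2⟩ | ⟨h1, h2⟩)
              · exact pvRoot_unique q z r' Rz h1 hRz
              · exact absurd (pvRoot_unique q z Rz ra hRz h1) h
            · intro h'
              rw [h']
              exact Or.inl ⟨hRz, h⟩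
        refine ih _ _ _ _ n hn
          (pvUnion_valid q n ra rb hV2 hra01.1 hra01.2 hrb01.1 hrb01.2)
          (pvUnion_total q n ra rb hV2 hT2 hra01.1 hra01.2 hrb01.1 hrb01.2 hraq hrbq hc)
          (by rw [pvAssign_length]; exact hglen)
          ?_ ?_
          (pvNewMembers_val members n ga' gb' hga'b' hmval)
          hrest
        · -- InvLink for the merged state
          intro x y hx0 hx1 hy0 hy1
          obtain ⟨Rx, hRx⟩ := hT2 x hx0 hx1
          obtain ⟨Ry, hRy⟩ := hT2 y hy0 hy1
          have hLHS : pvSame (PySem.List.pySetD q ra rb) x y ↔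
              ((if Rx = ra then rb else Rx) = (if Ry = ra then rb else Ry)) := by
            constructor
            · rintro ⟨r, h1, h2⟩
              rw [← (hchar x Rx r hx0 hx1 hRx).mp h1, ← (hchar y Ry r hy0 hy1 hRy).mp h2]
            · intro h
              exact ⟨_, (hchar x Rx _ hx0 hx1 hRx).mpr rfl, (hchar y Ry _ hy0 hy1 hRy).mpr h⟩
          rw [hLHS, hG x hx0 hx1, hG y hy0 hy1]
          exact pvMergeClass (pvPget gid aN) (pvPget gid bN) ga' gb'
            (pvPget gid x) (pvPget gid y) Rx Ry ra rb hsw hc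
            (hbr x aN Rx ra hx0 hx1 haN0 haN1 hRx hqa)
            (hbr x bN Rx rb hx0 hx1 hbN0 hbN1 hRx hqb)
            (hbr y aN Ry ra hy0 hy1 haN0 haN1 hRy hqa)
            (hbr y bN Ry rb hy0 hy1 hbN0 hbN1 hRy hqb)
            (hbr x y Rx Ry hx0 hx1 hy0 hy1 hRx hRy)
        · -- members characterization for the merged state
          intro g x hx0 hx1
          rw [hG x hx0 hx1]
          exact pvNewMembers_mem gid members n ga' gb' hga'b' hmem g x hx0 hx1

-- ===== VERDICT (by name: the statement is the Claim_ definition above) =====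
lemma pvInit_pget (N : Int) : ∀ i : Int, 0 ≤ i → i < N →
    pvPget (PySem.List.pyRange 0 N 1) i = i := by
  intro i hi0 hi1
  have hlen : (PySem.List.pyRange 0 N 1).length = (N - 0).toNat :=
    PySem.List.length_pyRange_one 0 N
  have hil : i < ((PySem.List.pyRange 0 N 1).length : Int) := by omega
  rw [pvPget, PySem.List.pyGetD_eq_getElem _ 0 hi0 hil,
      PySem.List.getElem_pyRange_one 0 N i.toNat (by omega)]
  omega

theorem earliestAcq_spec : Claim_equal_earliestAcq := by
  intro logs N _ hpre
  unfold Spec_earliestAcq earliestAcq earliestAcq_alt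
  set L := PySem.List.sorted logs (fun l => l) false with hL_def
  have hpre' : ∀ l ∈ L, l.length = 3 ∧
      -N ≤ PySem.List.pyGetD l 1 0 ∧ PySem.List.pyGetD l 1 0 < N ∧
      -N ≤ PySem.List.pyGetD l 2 0 ∧ PySem.List.pyGetD l 2 0 < N := by
    intro l hl
    have hl' : l ∈ logs := (PySem.List.mem_sorted logs _ false l).mp hl
    obtain ⟨h3, h1a, h1b, h2a, h2b⟩ := hpre l hl'
    obtain ⟨u, v, w, rfl⟩ := List.length_eq_three.mp h3
    have e1 : PySem.List.pyGetD [u, v, w] 1 0 = v := by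
      simp [PySem.List.pyGetD, PySem.List.pyGet?, PySem.List.pyIdx?]
    have e2 : PySem.List.pyGetD [u, v, w] 2 0 = w := by
      simp [PySem.List.pyGetD, PySem.List.pyGet?, PySem.List.pyIdx?]
    have g1 : [u, v, w].getD 1 0 = v := rfl
    have g2 : [u, v, w].getD 2 0 = w := rfl
    rw [g1] at h1a h1b
    rw [g2] at h2a h2b
    rw [e1, e2]
    exact ⟨rfl, h1a, h1b, h2a, h2b⟩
  by_cases hN : 0 < N
  · -- the interesting case
    have hp0 := pvInit_pget N
    have hlen : (PySem.List.pyRange 0 N 1).length = (N - 0).toNat :=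
      PySem.List.length_pyRange_one 0 N
    have hV0 : pvValid (PySem.List.pyRange 0 N 1) N := by
      refine ⟨by omega, fun i hi0 hi1 => ?_⟩
      rw [hp0 i hi0 hi1]
      exact ⟨hi0, hi1⟩
    have hT0 : pvTotal (PySem.List.pyRange 0 N 1) N :=
      fun x hx0 hx1 => ⟨x, hp0 x hx0 hx1, 0, rfl⟩
    have hroot0 : ∀ x r, 0 ≤ x → x < N → pvIsRoot (PySem.List.pyRange 0 N 1) x r → r = x := by
      rintro x r hx0 hx1 ⟨_, k, e⟩
      rw [pvIter_fix (PySem.List.pyRange 0 N 1) x (hp0 x hx0 hx1) k] at e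
      exact e.symm
    have hlink0 : ∀ x y, 0 ≤ x → x < N → 0 ≤ y → y < N →
        (pvSame (PySem.List.pyRange 0 N 1) x y ↔
          pvPget (PySem.List.pyRange 0 N 1) x = pvPget (PySem.List.pyRange 0 N 1) y) := by
      intro x y hx0 hx1 hy0 hy1
      rw [hp0 x hx0 hx1, hp0 y hy0 hy1]
      constructor
      · rintro ⟨r, h1, h2⟩
        rw [← hroot0 x r hx0 hx1 h1, ← hroot0 y r hy0 hy1 h2]
      · intro h
        exact ⟨x, ⟨hp0 x hx0 hx1, 0, rfl⟩, h ▸ ⟨hp0 x hx0 hx1, 0, rfl⟩⟩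
    have hm0 : ∀ g : Int,
        ((PySem.List.pyRange 0 N 1).foldl (fun d i => d.insert i [i]) PySem.Dict.empty).getD g []
          = if g ∈ PySem.List.pyRange 0 N 1 then [g] else [] := by
      intro g
      rw [pvDict_getD_foldl_insert_fn (PySem.List.pyRange 0 N 1) (fun i => [i]) PySem.Dict.empty g [],
          PySem.Dict.getD_empty]
    have hmem0 : ∀ g x, 0 ≤ x → x < N →
        (x ∈ ((PySem.List.pyRange 0 N 1).foldl (fun d i => d.insert i [i]) PySem.Dict.empty).getD g []
          ↔ pvPget (PySem.List.pyRange 0 N 1) x = g) := by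
      intro g x hx0 hx1
      rw [hm0 g, hp0 x hx0 hx1]
      by_cases hg : g ∈ PySem.List.pyRange 0 N 1
      · rw [if_pos hg]
        simp
      · rw [if_neg hg]
        simp only [List.not_mem_nil, false_iff]
        intro h
        exact hg (by rw [← h]; exact (PySem.List.mem_pyRange_one).mpr ⟨hx0, hx1⟩)
    have hmval0 : ∀ g x,
        x ∈ ((PySem.List.pyRange 0 N 1).foldl (fun d i => d.insert i [i]) PySem.Dict.empty).getD g []
          → 0 ≤ x ∧ x < N := by
      intro g x hx
      rw [hm0 g] at hx
      by_cases hg : g ∈ PySem.List.pyRange 0 N 1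
      · rw [if_pos hg] at hx
        have := (PySem.List.mem_pyRange_one).mp hg
        simp only [List.mem_singleton] at hx
        omega
      · rw [if_neg hg] at hx
        exact absurd hx (List.not_mem_nil)
    exact pvLoop_eq L (PySem.List.pyRange 0 N 1) (PySem.List.pyRange 0 N 1) _ N N
      hN hV0 hT0 (by omega) hlink0 hmem0 hmval0 hpre'
  · -- N ≤ 0: the precondition forces logs (hence L) to be empty
    cases hL : L with
    | nil => rfl
    | cons l t =>
      exfalso
      have h := hpre' l (hL ▸ List.mem_cons_self)
      omega
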